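-- pv_equiv track=rewrite | github.com/eyewirunya/unknownapp | python/TimeSlot.py | share_days
-- ===== SOURCE A (Python) =====
-- def share_days(d1, d2):
--     a = d1.upper()
--     b = d2.upper()
--     tokens = ["TH", "M", "T", "W", "F", "S", "U"]
--     for token in tokens:
--         if token in a and token in b:
--             return True
--     return False
-- ===== SOURCE B (Python) =====
-- def share_days(d1, d2):
--     a = d1.upper()
--     b = d2.upper()
--     common = set(a) & set(b)
--     if common & set("MTWFSU"):
--         return True
--     return "TH" in a and "TH" in b
-- ===== Notes on version B (the rewrite author's own statement) =====
-- stated objective: alternative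
-- what changed: Replaces the per-token substring loop with a character-set intersection: the shared single-letter day codes are found by intersecting set(a) and set(b) with the day letters, and only the two-letter token 'TH' still needs a substring test; correct because every token except 'TH' is one character, so 'token in s' is just character membership.
import Mathlib
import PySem

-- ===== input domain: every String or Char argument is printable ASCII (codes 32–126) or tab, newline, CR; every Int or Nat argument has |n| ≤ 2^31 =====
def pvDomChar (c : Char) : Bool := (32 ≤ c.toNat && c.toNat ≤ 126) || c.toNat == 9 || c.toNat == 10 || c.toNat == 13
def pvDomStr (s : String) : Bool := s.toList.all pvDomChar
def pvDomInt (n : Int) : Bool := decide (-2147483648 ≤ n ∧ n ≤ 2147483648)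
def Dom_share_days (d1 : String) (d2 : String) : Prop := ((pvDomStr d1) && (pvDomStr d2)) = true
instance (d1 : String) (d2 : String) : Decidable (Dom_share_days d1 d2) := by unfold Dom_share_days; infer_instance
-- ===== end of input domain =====

-- B replaces the per-token substring loop with a character-set intersection (all tokens but "TH" are single letters); alternative algorithm, similar cost.


-- ===== PORT A =====
-- the 'for token in tokens' loop with early return
def share_days_loop (a : String) (b : String) : List String → Bool
  | [] => false
  | t :: rest =>
      if PySem.Str.isIn t a && PySem.Str.isIn t b then true
      else share_days_loop a b rest

def share_days (d1 : String) (d2 : String) : Bool :=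
  let a := PySem.Str.upper d1
  let b := PySem.Str.upper d2
  let tokens := ["TH", "M", "T", "W", "F", "S", "U"]
  share_days_loop a b tokens

-- ===== PORT B =====
def share_days_alt (d1 : String) (d2 : String) : Bool :=
  let a := PySem.Str.upper d1
  let b := PySem.Str.upper d2
  let common : PySem.Set Char :=
    PySem.Set.inter (PySem.Set.ofList a.toList) (PySem.Set.ofList b.toList)
  if PySem.Set.inter common (PySem.Set.ofList "MTWFSU".toList) ≠ [] then true
  else PySem.Str.isIn "TH" a && PySem.Str.isIn "TH" b

-- ===== PRECONDITION & SPEC =====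
def Spec_share_days (d1 : String) (d2 : String) (out : Bool) : Prop := out = share_days_alt d1 d2
instance (d1 : String) (d2 : String) (out : Bool) : Decidable (Spec_share_days d1 d2 out) := by unfold Spec_share_days; infer_instance

-- ===== CLAIM (what is proved, stated in full; the proofs are below) =====
def Claim_equal_share_days : Prop := ∀ (d1 : String) (d2 : String), Dom_share_days d1 d2 → Spec_share_days d1 d2 (share_days d1 d2)

-- ===== LEMMAS AND PROOFS =====

-- A's early-return loop is List.any
theorem share_days_loop_eq_any (a b : String) (ts : List String) :
    share_days_loop a b ts = ts.any (fun t => PySem.Str.isIn t a && PySem.Str.isIn t b) := by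
  induction ts with
  | nil => rfl
  | cons t rest ih =>
      simp only [share_days_loop, List.any_cons]
      split_ifs with h
      · rw [h, Bool.true_or]
      · rw [Bool.not_eq_true] at h
        rw [h, Bool.false_or, ih]

-- a one-character substring test is character membership
theorem singleton_infix_iff (c : Char) (l : List Char) : [c] <:+: l ↔ c ∈ l := by
  constructor
  · intro h; exact h.subset (List.mem_singleton_self c)
  · intro h
    obtain ⟨s, t, rfl⟩ := List.append_of_mem h
    exact ⟨s, t, by simp⟩

theorem isIn_single (sub : String) (c : Char) (s : String) (h : sub.toList = [c]) :
    PySem.Str.isIn sub s = s.toList.contains c := by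
  rcases hb : s.toList.contains c with _ | _
  · rw [← Bool.not_eq_true, PySem.Str.isIn_iff_infix, h, singleton_infix_iff]
    simpa using hb
  · rw [PySem.Str.isIn_iff_infix, h, singleton_infix_iff]
    simpa using hb

-- B's intersection test, characterised
theorem alt_inter_iff (a b : String) :
    (PySem.Set.inter (PySem.Set.inter (PySem.Set.ofList a.toList) (PySem.Set.ofList b.toList))
        (PySem.Set.ofList "MTWFSU".toList) ≠ []) ↔
      ∃ c ∈ (['M','T','W','F','S','U'] : List Char), c ∈ a.toList ∧ c ∈ b.toList := by
  constructor
  · intro h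
    obtain ⟨c, hc⟩ := List.exists_mem_of_ne_nil _ h
    rw [PySem.Set.mem_inter, PySem.Set.mem_inter, PySem.Set.mem_ofList,
        PySem.Set.mem_ofList, PySem.Set.mem_ofList] at hc
    refine ⟨c, ?_, hc.1.1, hc.1.2⟩
    have hL : "MTWFSU".toList = ['M','T','W','F','S','U'] := rfl
    rw [hL] at hc
    exact hc.2
  · rintro ⟨c, hm, ha, hb⟩
    intro hnil
    have : c ∈ PySem.Set.inter
        (PySem.Set.inter (PySem.Set.ofList a.toList) (PySem.Set.ofList b.toList))
        (PySem.Set.ofList "MTWFSU".toList) := by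
      rw [PySem.Set.mem_inter, PySem.Set.mem_inter, PySem.Set.mem_ofList,
          PySem.Set.mem_ofList, PySem.Set.mem_ofList]
      refine ⟨⟨ha, hb⟩, ?_⟩
      have hL : "MTWFSU".toList = ['M','T','W','F','S','U'] := rfl
      rw [hL]
      exact hm
    rw [hnil] at this
    exact absurd this (List.not_mem_nil)

-- ===== VERDICT (by name: the statement is the Claim_ definition above) =====
theorem share_days_spec : Claim_equal_share_days := by
  intro d1 d2 _
  unfold Spec_share_days share_days share_days_alt
  simp only []
  rw [share_days_loop_eq_any]
  set a := PySem.Str.upper d1 with ha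
  set b := PySem.Str.upper d2 with hb
  simp only [List.any_cons, List.any_nil, Bool.or_false]
  rw [isIn_single "M" 'M' a rfl, isIn_single "M" 'M' b rfl,
      isIn_single "T" 'T' a rfl, isIn_single "T" 'T' b rfl,
      isIn_single "W" 'W' a rfl, isIn_single "W" 'W' b rfl,
      isIn_single "F" 'F' a rfl, isIn_single "F" 'F' b rfl,
      isIn_single "S" 'S' a rfl, isIn_single "S" 'S' b rfl,
      isIn_single "U" 'U' a rfl, isIn_single "U" 'U' b rfl]
  by_cases h : PySem.Set.inter
      (PySem.Set.inter (PySem.Set.ofList a.toList) (PySem.Set.ofList b.toList))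
      (PySem.Set.ofList "MTWFSU".toList) ≠ []
  · rw [if_pos h]
    obtain ⟨c, hm, hca, hcb⟩ := (alt_inter_iff a b).mp h
    fin_cases hm <;> simp
    · exact Or.inr (Or.inl ⟨hca, hcb⟩)
    · exact Or.inr (Or.inr (Or.inl ⟨hca, hcb⟩))
    · exact Or.inr (Or.inr (Or.inr (Or.inl ⟨hca, hcb⟩)))
    · exact Or.inr (Or.inr (Or.inr (Or.inr (Or.inl ⟨hca, hcb⟩))))
    · exact Or.inr (Or.inr (Or.inr (Or.inr (Or.inr (Or.inl ⟨hca, hcb⟩)))))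
    · exact Or.inr (Or.inr (Or.inr (Or.inr (Or.inr (Or.inr ⟨hca, hcb⟩)))))
  · rw [if_neg h]
    rw [not_not] at h
    have hnone := (alt_inter_iff a b).not.mp (by rw [h]; simp)
    push_neg at hnone
    have hM := hnone 'M' (by simp)
    have hT := hnone 'T' (by simp)
    have hW := hnone 'W' (by simp)
    have hF := hnone 'F' (by simp)
    have hS := hnone 'S' (by simp)
    have hU := hnone 'U' (by simp)
    cases hA : a.toList.contains 'M' <;> cases hB : b.toList.contains 'M' <;>
      simp_all
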